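-- pv_equiv track=rewrite | github.com/jramaswami/LeetCode_Python | ambiguous_coordinates.py | add_decimal
-- ===== SOURCE A (Python) =====
-- def add_decimal(numbers):
--     """Add the decimal in a valid place."""
--     result = []
--
--     if numbers == ['0']:
--         return numbers
--
--     # Just in case, but it shouldn't happen.
--     if len(numbers) > 1 and numbers[0] == '0' and numbers[-1] == '0':
--         return result
--
--     # If the last digit is 0 then this can only be an integer otherwise
--     # it would have an extraneous trailing zero.
--     if numbers[0] != '0':
--         result.append("".join(numbers))
--
--     if len(numbers) > 1 and numbers[-1] == '0':
--         return result
--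
--     # If the number has a leading zero, then it can only be 0.xxxx
--     # otherwise it would have an extraneous leading zero.
--     if len(numbers) > 1:
--         result.append("".join(numbers[:1] + ["."] + numbers[1:]))
--     if numbers[0] == '0':
--         return result
--
--     for di in range(2, len(numbers)):
--         result.append("".join(numbers[:di] + ["."] + numbers[di:]))
--
--     return result
-- ===== SOURCE B (Python) =====
-- def add_decimal(numbers):
--     """Add the decimal in a valid place."""
--     if numbers == ['0']:
--         return ['0']
--     lead = numbers[0] != '0'
--     result = ["".join(numbers)] if lead else []
--     if len(numbers) > 1 and numbers[-1] != '0':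
--         result += splits(numbers[:1], numbers[1:], lead)
--     return result
--
--
-- def splits(left, right, more):
--     """Candidates with the point after left; recurse shifting the point right while allowed."""
--     out = ["".join(left + ["."] + right)]
--     if more and len(right) > 1:
--         out += splits(left + right[:1], right[1:], more)
--     return out
-- ===== Notes on version B (the rewrite author's own statement) =====
-- stated objective: alternative
-- what changed: Replaced A's flat cascade of early returns plus an index loop over split positions with a recursive generator: B classifies the input once (leading/trailing zero) and a helper recursion over the shrinking suffix produces the decimal candidates, shifting the point right one token per call.
import Mathlib
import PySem

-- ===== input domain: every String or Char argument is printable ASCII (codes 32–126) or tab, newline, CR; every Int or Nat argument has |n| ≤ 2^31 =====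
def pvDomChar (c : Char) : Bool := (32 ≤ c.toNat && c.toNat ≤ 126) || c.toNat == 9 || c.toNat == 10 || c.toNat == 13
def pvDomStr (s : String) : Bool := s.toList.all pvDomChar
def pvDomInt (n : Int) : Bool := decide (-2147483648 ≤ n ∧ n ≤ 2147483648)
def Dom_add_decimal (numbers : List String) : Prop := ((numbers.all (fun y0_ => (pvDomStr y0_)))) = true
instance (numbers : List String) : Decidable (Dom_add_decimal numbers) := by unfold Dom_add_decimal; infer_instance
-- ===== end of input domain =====

-- B replaces A's cascade of early returns plus an index loop by a one-shot
-- classification and a recursive generator of decimal placements (objective: alternative).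


-- ===== PORT A =====
-- numbers[0] / numbers[-1] are read as headD/getLastD: Pre_ (numbers ≠ []) makes this exact.
def add_decimal (numbers : List String) : List String :=
  if numbers = ["0"] then numbers
  else if numbers.length > 1 ∧ numbers.headD "" = "0" ∧ numbers.getLastD "" = "0" then []
  else
    let result : List String :=
      if numbers.headD "" ≠ "0" then [PySem.Str.join "" numbers] else []
    if numbers.length > 1 ∧ numbers.getLastD "" = "0" then result
    else
      let result :=
        if numbers.length > 1 then
          result ++ [PySem.Str.join "" (PySem.List.slice numbers none (some 1) ++ ["."] ++ PySem.List.slice numbers (some 1) none)]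
        else result
      if numbers.headD "" = "0" then result
      else
        (PySem.List.pyRange 2 (numbers.length : Int) 1).foldl
          (fun acc di =>
            acc ++ [PySem.Str.join "" (PySem.List.slice numbers none (some di) ++ ["."] ++ PySem.List.slice numbers (some di) none)])
          result

-- ===== PORT B =====
-- helper `splits` of Source B: candidates with the point after `left`, recursing rightward while `more`.
def splits (left right : List String) (more : Bool) : List String :=
  let out := [PySem.Str.join "" (left ++ ["."] ++ right)]
  if more = true ∧ right.length > 1 then
    out ++ splits (left ++ PySem.List.slice right none (some 1)) (PySem.List.slice right (some 1) none) more
  else out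
termination_by right.length
decreasing_by
  rw [PySem.List.slice_from right (show (0:Int) ≤ 1 by norm_num)]
  simp only [List.length_drop]
  omega

def add_decimal_alt (numbers : List String) : List String :=
  if numbers = ["0"] then ["0"]
  else
    let lead : Bool := numbers.headD "" != "0"
    let result : List String := if lead then [PySem.Str.join "" numbers] else []
    if numbers.length > 1 ∧ numbers.getLastD "" ≠ "0" then
      result ++ splits (PySem.List.slice numbers none (some 1)) (PySem.List.slice numbers (some 1) none) lead
    else result

-- ===== PRECONDITION & SPEC =====
-- Pre_ excludes only the empty list, on which Python A raises IndexError at numbers[0].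
def Pre_add_decimal (numbers : List String) : Prop := numbers ≠ []
instance (numbers : List String) : Decidable (Pre_add_decimal numbers) := by unfold Pre_add_decimal; infer_instance
def pvWitness_add_decimal : List String := ["1", "2", "0"]

def Spec_add_decimal (numbers : List String) (out : List String) : Prop := out = add_decimal_alt numbers
instance (numbers : List String) (out : List String) : Decidable (Spec_add_decimal numbers out) := by unfold Spec_add_decimal; infer_instance

-- ===== CLAIM (what is proved, stated in full; the proofs are below) =====
def Claim_equal_add_decimal : Prop := ∀ (numbers : List String), Dom_add_decimal numbers → Pre_add_decimal numbers → Spec_add_decimal numbers (add_decimal numbers)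

-- ===== LEMMAS AND PROOFS =====

-- the split string at position p (shared shape of both programs' candidates)
def splitAt (ns : List String) (p : Int) : String :=
  PySem.Str.join "" (PySem.List.slice ns none (some p) ++ ["."] ++ PySem.List.slice ns (some p) none)

lemma splits_false (left right : List String) :
    splits left right false = [PySem.Str.join "" (left ++ ["."] ++ right)] := by
  rw [splits.eq_def]; simp

lemma slice_take (ns : List String) (k : Nat) :
    PySem.List.slice ns none (some (k : Int)) = ns.take k :=
  PySem.List.slice_to_natCast ns k

lemma slice_drop (ns : List String) (k : Nat) :
    PySem.List.slice ns (some (k : Int)) none = ns.drop k :=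
  PySem.List.slice_from_natCast ns k

lemma splits_true_eq_map (ns : List String) (m k : Nat) (hm : m = ns.length - k)
    (hk : 1 ≤ k) (hlt : k < ns.length) :
    splits (ns.take k) (ns.drop k) true
      = (PySem.List.pyRange (k : Int) (ns.length : Int) 1).map (splitAt ns) := by
  induction m generalizing k with
  | zero => omega
  | succ m ih =>
    have hone : PySem.List.slice (ns.drop k) none (some 1) = (ns.drop k).take 1 := by
      rw [show (1 : Int) = ((1 : Nat) : Int) from rfl, slice_take]
    have hone' : PySem.List.slice (ns.drop k) (some 1) none = (ns.drop k).drop 1 := by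
      rw [show (1 : Int) = ((1 : Nat) : Int) from rfl, slice_drop]
    have hcons : PySem.List.pyRange (k : Int) (ns.length : Int) 1
        = (k : Int) :: PySem.List.pyRange ((k : Int) + 1) (ns.length : Int) 1 :=
      PySem.List.pyRange_one_cons (by exact_mod_cast hlt)
    have hhead : PySem.Str.join "" (ns.take k ++ "." :: ns.drop k) = splitAt ns (k : Int) := by
      rw [splitAt, slice_take, slice_drop]; simp
    by_cases hbig : (ns.drop k).length > 1
    · have hrec : splits (ns.take k) (ns.drop k) true
          = [PySem.Str.join "" (ns.take k ++ ["."] ++ ns.drop k)]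
            ++ splits (ns.take (k + 1)) (ns.drop (k + 1)) true := by
        conv_lhs => rw [splits.eq_def]
        rw [if_pos (⟨rfl, hbig⟩ : true = true ∧ (ns.drop k).length > 1), hone, hone',
            List.drop_drop, ← List.take_add]
      rw [hrec, ih (k + 1) (by simp at hbig ⊢; omega) (by omega) (by simp at hbig; omega),
          hcons]
      simp [hhead]
    · conv_lhs => rw [splits.eq_def]
      rw [if_neg (by simp; simp at hbig; omega)]
      have hstop : k + 1 = ns.length := by simp at hbig; omega
      have hnil : PySem.List.pyRange ((k : Int) + 1) (ns.length : Int) 1 = [] :=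
        PySem.List.pyRange_one_eq_nil (by exact_mod_cast Nat.le_of_eq hstop.symm)
      rw [hcons, hnil]
      simp [hhead]

-- ===== VERDICT (by name: the statement is the Claim_ definition above) =====
theorem add_decimal_spec : Claim_equal_add_decimal := by
  intro numbers _ hpre
  unfold Spec_add_decimal
  match numbers with
  | [] => exact absurd rfl hpre
  | [x] =>
    by_cases hx : x = "0"
    · subst hx; decide
    · simp [add_decimal, add_decimal_alt, hx]
  | a :: b :: t =>
    set ns := a :: b :: t with hns
    have hne : ns ≠ ["0"] := by simp [hns]
    have hlen : ns.length > 1 := by simp [hns]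
    have hhd : ns.headD "" = a := rfl
    have hbt : ((b :: t).getLast?.getD "" = "0") ↔ (ns.getLastD "" = "0") := by
      rw [← List.getLastD_eq_getLast?]
      simp [hns, List.getLastD_eq_getLast?, List.getLast?_cons_cons]
    have hsl1 : PySem.List.slice ns none (some 1) = ns.take 1 := by
      rw [show (1 : Int) = ((1 : Nat) : Int) from rfl, slice_take]
    have hsr1 : PySem.List.slice ns (some 1) none = ns.drop 1 := by
      rw [show (1 : Int) = ((1 : Nat) : Int) from rfl, slice_drop]
    by_cases ha : a = "0" <;> by_cases hlast : ns.getLastD "" = "0"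
    · -- leading and trailing zero: both return []
      have hlast' : (b :: t).getLast?.getD "" = "0" := hbt.mpr hlast
      simp [add_decimal, add_decimal_alt, hns, ha, hlast']
    · -- leading zero only: single candidate 0.xxx on both sides
      have hlast' : ¬ (b :: t).getLast?.getD "" = "0" := fun h => hlast (hbt.mp h)
      simp only [add_decimal, add_decimal_alt, if_neg hne, hhd, ha]
      rw [show (("0" : String) != "0") = false from rfl, splits_false]
      simp [hns, hlast']
    · -- trailing zero only: integer candidate on both sides
      have hlast' : (b :: t).getLast?.getD "" = "0" := hbt.mpr hlast
      simp [add_decimal, add_decimal_alt, hns, ha, hlast']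
    · -- general case: integer plus every split
      have hlast' : ¬ (b :: t).getLast?.getD "" = "0" := fun h => hlast (hbt.mp h)
      have hmap : splits (ns.take 1) (ns.drop 1) true
          = (PySem.List.pyRange (1 : Int) (ns.length : Int) 1).map (splitAt ns) :=
        splits_true_eq_map ns (ns.length - 1) 1 rfl le_rfl (by omega)
      have hr12 : PySem.List.pyRange (1 : Int) (ns.length : Int) 1
          = 1 :: PySem.List.pyRange 2 (ns.length : Int) 1 := by
        rw [PySem.List.pyRange_one_cons (by exact_mod_cast hlen)]
        norm_num
      have hmap' : splits (PySem.List.slice ns none (some 1)) (PySem.List.slice ns (some 1) none) true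
          = (PySem.List.pyRange (1 : Int) (ns.length : Int) 1).map (splitAt ns) := by
        rw [hsl1, hsr1]; exact hmap
      have hlastQ : ¬ ns.getLast?.getD "" = "0" := by
        rw [List.getLastD_eq_getLast?] at hlast; exact hlast
      have hbne : (a != "0") = true := by simp [ha]
      simp only [add_decimal, add_decimal_alt, if_neg hne, hhd, hbne]
      simp [hlen, ha, hlastQ, hmap', hr12, splitAt]
      induction PySem.List.pyRange 2 (ns.length : Int) 1 with
      | nil => rfl
      | cons x xs ih => simp [splitAt, ih]
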